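-- pv_equiv track=rewrite | github.com/Goldenfreddy0703/repository.hooty | repo/plugin.video.otaku/resources/lib/ui/megacloud_extractor.py | keygen2
-- ===== SOURCE A (Python) =====
-- def keygen2(megacloud_key, client_key):
--     """Generate decryption key from megacloud and client keys"""
--     temp_key = megacloud_key + client_key
--
--     # Numeric hash
--     hash_val = 0
--     keygen_hash_mult_val = 31
--     for char in temp_key:
--         hash_val = ord(char) + hash_val * keygen_hash_mult_val + (hash_val << 7) - hash_val
--
--     # Get absolute value
--     hash_val = abs(hash_val)
--     l_hash = hash_val % 0x7FFFFFFFFFFFFFFF  # Limit to 64 bits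
--
--     # Apply XOR
--     keygen_xor_val = 247
--     temp_key = ''.join(chr(ord(c) ^ keygen_xor_val) for c in temp_key)
--
--     # Circular shift
--     keygen_shift_val = 5
--     pivot = l_hash % len(temp_key) + keygen_shift_val
--     temp_key = temp_key[pivot:] + temp_key[:pivot]
--
--     # Leaf in values
--     leaf_str = client_key[::-1]  # Reverse
--     return_key = ""
--     max_len = max(len(temp_key), len(leaf_str))
--     for i in range(max_len):
--         return_key += (temp_key[i] if i < len(temp_key) else "") + (leaf_str[i] if i < len(leaf_str) else "")
--
--     # Limit the length of the key
--     return_key = return_key[:96 + l_hash % 33]  # Clamps between 96 and 128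
--
--     # Normalize to ASCII values
--     return_key = ''.join(chr(ord(c) % 95 + 32) for c in return_key)
--
--     return return_key
-- ===== SOURCE B (Python) =====
-- # B: fused single length-bounded pass — compute final length L first, then emit
-- # interleaved, normalized chars and stop exactly at L (no full interleave, no slice,
-- # no second normalization pass).
--
-- def _norm(c):
--     return chr(ord(c) % 95 + 32)
--
--
-- def _fuse(tk, lf, rem):
--     """Emit up to `rem` normalized chars, interleaving tk and lf pairwise."""
--     if rem == 0:
--         return ""
--     if tk and lf:
--         if rem == 1:
--             return _norm(tk[0])
--         return _norm(tk[0]) + _norm(lf[0]) + _fuse(tk[1:], lf[1:], rem - 2)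
--     if tk:
--         return _norm(tk[0]) + _fuse(tk[1:], "", rem - 1)
--     if lf:
--         return _norm(lf[0]) + _fuse("", lf[1:], rem - 1)
--     return ""
--
--
-- def keygen2(megacloud_key, client_key):
--     temp_key = megacloud_key + client_key
--
--     h = 0
--     for char in temp_key:
--         h = ord(char) + h * 31 + (h << 7) - h
--     l_hash = abs(h) % 0x7FFFFFFFFFFFFFFF
--
--     xored = ''.join(chr(ord(c) ^ 247) for c in temp_key)
--     pivot = l_hash % len(xored) + 5
--     rotated = xored[pivot:] + xored[:pivot]
--
--     leaf_str = client_key[::-1]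
--     L = 96 + l_hash % 33
--     return _fuse(rotated, leaf_str, L)
-- ===== Notes on version B (the rewrite author's own statement) =====
-- stated objective: alternative
-- what changed: B computes the final length L = 96 + l_hash % 33 up front and replaces A's build-full-interleave / slice-to-L / second normalization comprehension with one fused recursive pass that interleaves the rotated key and reversed client key, normalizes each character as it is emitted, and stops exactly at L (mid-pair if needed).
import Mathlib
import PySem

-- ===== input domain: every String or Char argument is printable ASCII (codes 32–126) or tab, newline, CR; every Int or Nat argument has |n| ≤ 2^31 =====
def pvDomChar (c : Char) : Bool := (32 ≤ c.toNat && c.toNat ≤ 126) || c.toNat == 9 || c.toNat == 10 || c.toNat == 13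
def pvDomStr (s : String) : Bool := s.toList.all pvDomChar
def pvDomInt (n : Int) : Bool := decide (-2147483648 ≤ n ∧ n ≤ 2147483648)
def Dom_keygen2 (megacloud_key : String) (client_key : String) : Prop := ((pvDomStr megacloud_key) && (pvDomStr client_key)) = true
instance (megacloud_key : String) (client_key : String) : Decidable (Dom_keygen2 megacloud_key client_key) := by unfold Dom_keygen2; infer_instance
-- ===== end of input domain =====

-- B fuses A's build-interleave / slice-to-L / second normalization pass into one
-- length-bounded generating pass (objective: alternative decomposition, same asymptotic cost).

-- ===== PORT A =====
-- A's 'for i in range(max_len): return_key += (temp_key[i] if …) + (leaf_str[i] if …)'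
def keygen2Interleave (tk : List Char) (lf : List Char) : List Char :=
  (PySem.List.pyRange 0 (max (PySem.List.len tk) (PySem.List.len lf)) 1).foldl
    (fun acc i =>
      acc ++ (if i < PySem.List.len tk then [PySem.List.pyGetD tk i ' '] else [])
          ++ (if i < PySem.List.len lf then [PySem.List.pyGetD lf i ' '] else []))
    []

def keygen2 (megacloud_key : String) (client_key : String) : String :=
  let tempKey : List Char := megacloud_key.toList ++ client_key.toList
  -- hash_val loop; 'h << 7' is '<<<' on Int
  let hashVal : Int := tempKey.foldl (fun h c => (c.toNat : Int) + h * 31 + (h <<< 7) - h) 0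
  let lHash : Int := PySem.Int.mod |hashVal| 0x7FFFFFFFFFFFFFFF
  -- 'chr(ord(c) ^ 247)': ord values are nonnegative, so Python's ^ is Nat xor
  let tempKey2 : List Char := tempKey.map (fun c => Char.ofNat (c.toNat ^^^ 247))
  let pivot : Int := PySem.Int.mod lHash (PySem.List.len tempKey2) + 5
  let tempKey3 : List Char :=
    PySem.List.slice tempKey2 (some pivot) none ++ PySem.List.slice tempKey2 none (some pivot)
  -- client_key[::-1] is reverse (PySem.List.slice?_none_none_neg_one)
  let leafStr : List Char := client_key.toList.reverse
  let returnKey : List Char := keygen2Interleave tempKey3 leafStr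
  let returnKey2 : List Char :=
    PySem.List.slice returnKey none (some (96 + PySem.Int.mod lHash 33))
  String.ofList (returnKey2.map (fun c => Char.ofNat (c.toNat % 95 + 32)))

-- ===== PORT B =====
def keygen2Norm (c : Char) : Char := Char.ofNat (c.toNat % 95 + 32)

-- B's '_fuse': emit up to rem normalized chars, interleaving pairwise, stopping exactly at rem
def keygen2Fuse : List Char → List Char → Nat → List Char
  | _, _, 0 => []
  | c :: _, _ :: _, 1 => [keygen2Norm c]
  | c :: tk, d :: lf, r + 2 => keygen2Norm c :: keygen2Norm d :: keygen2Fuse tk lf r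
  | c :: tk, [], r + 1 => keygen2Norm c :: keygen2Fuse tk [] r
  | [], d :: lf, r + 1 => keygen2Norm d :: keygen2Fuse [] lf r
  | [], [], _ + 1 => []

def keygen2_alt (megacloud_key : String) (client_key : String) : String :=
  let tempKey : List Char := megacloud_key.toList ++ client_key.toList
  let h : Int := tempKey.foldl (fun h c => (c.toNat : Int) + h * 31 + (h <<< 7) - h) 0
  let lHash : Int := PySem.Int.mod |h| 0x7FFFFFFFFFFFFFFF
  let xored : List Char := tempKey.map (fun c => Char.ofNat (c.toNat ^^^ 247))
  let pivot : Int := PySem.Int.mod lHash (PySem.List.len xored) + 5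
  let rotated : List Char :=
    PySem.List.slice xored (some pivot) none ++ PySem.List.slice xored none (some pivot)
  let leafStr : List Char := client_key.toList.reverse
  let L : Nat := (96 + PySem.Int.mod lHash 33).toNat
  String.ofList (keygen2Fuse rotated leafStr L)

-- ===== PRECONDITION & SPEC =====
-- Pre_ excludes only the input pair with both strings empty, on which A raises ZeroDivisionError
-- ('l_hash % len(temp_key)'); B raises there too.
def Pre_keygen2 (megacloud_key : String) (client_key : String) : Prop :=
  megacloud_key.toList ++ client_key.toList ≠ []
instance (megacloud_key : String) (client_key : String) : Decidable (Pre_keygen2 megacloud_key client_key) := by unfold Pre_keygen2; infer_instance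

def pvWitness_keygen2 : String × String := ("ab", "cd")

def Spec_keygen2 (megacloud_key : String) (client_key : String) (out : String) : Prop := out = keygen2_alt megacloud_key client_key
instance (megacloud_key : String) (client_key : String) (out : String) : Decidable (Spec_keygen2 megacloud_key client_key out) := by unfold Spec_keygen2; infer_instance

-- ===== CLAIM (what is proved, stated in full; the proofs are below) =====
def Claim_equal_keygen2 : Prop := ∀ (megacloud_key : String) (client_key : String), Dom_keygen2 megacloud_key client_key → Pre_keygen2 megacloud_key client_key → Spec_keygen2 megacloud_key client_key (keygen2 megacloud_key client_key)

-- ===== LEMMAS AND PROOFS =====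

-- structural interleaving (the value A's index loop builds)
def pvIl : List Char → List Char → List Char
  | [], lf => lf
  | c :: tk, [] => c :: tk
  | c :: tk, d :: lf => c :: d :: pvIl tk lf

-- Nat-level "optional element at index k"
def pvG (xs : List Char) (k : Nat) : List Char :=
  if k < xs.length then [xs.getD k ' '] else []

lemma pvG_succ (x : Char) (xs : List Char) (k : Nat) : pvG (x :: xs) (k + 1) = pvG xs k := by
  simp [pvG]

lemma pvG_zero_cons (x : Char) (xs : List Char) : pvG (x :: xs) 0 = [x] := by
  simp [pvG]

lemma pvFlat_single (xs : List Char) : (List.range xs.length).flatMap (pvG xs) = xs := by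
  induction xs with
  | nil => simp
  | cons x xs ih =>
    rw [List.length_cons, List.range_succ_eq_map, List.flatMap_cons, List.flatMap_map,
      pvG_zero_cons]
    have h : (fun k => pvG (x :: xs) (k + 1)) = pvG xs := funext fun k => pvG_succ x xs k
    simpa [h] using congrArg (x :: ·) ih

lemma pvFlat_il (tk lf : List Char) :
    (List.range (max tk.length lf.length)).flatMap (fun k => pvG tk k ++ pvG lf k) = pvIl tk lf := by
  induction tk generalizing lf with
  | nil =>
    have h : (fun k => pvG ([] : List Char) k ++ pvG lf k) = pvG lf := by
      funext k; simp [pvG]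
    simpa [pvIl.eq_def, h] using pvFlat_single lf
  | cons c tk ih =>
    cases lf with
    | nil =>
      have h : (fun k => pvG (c :: tk) k ++ pvG ([] : List Char) k) = pvG (c :: tk) := by
        funext k; simp [pvG]
      simpa [pvIl, h] using pvFlat_single (c :: tk)
    | cons d lf =>
      have hmax : max (c :: tk).length (d :: lf).length = max tk.length lf.length + 1 := by
        simp [Nat.succ_max_succ]
      rw [hmax, List.range_succ_eq_map, List.flatMap_cons, List.flatMap_map,
        pvG_zero_cons, pvG_zero_cons]
      have h : (fun k => pvG (c :: tk) (k + 1) ++ pvG (d :: lf) (k + 1))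
          = fun k => pvG tk k ++ pvG lf k := by
        funext k; rw [pvG_succ, pvG_succ]
      rw [h, ih lf, pvIl]
      rfl

lemma pvInterleave_eq (tk lf : List Char) : keygen2Interleave tk lf = pvIl tk lf := by
  unfold keygen2Interleave
  simp only [List.append_assoc]
  rw [PySem.List.foldl_append_eq_flatMap
    (fun i => (if i < PySem.List.len tk then [PySem.List.pyGetD tk i ' '] else [])
      ++ (if i < PySem.List.len lf then [PySem.List.pyGetD lf i ' '] else []))]
  have hN : max (PySem.List.len tk) (PySem.List.len lf)
      = ((max tk.length lf.length : Nat) : Int) := by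
    simp [PySem.List.len_eq, Nat.cast_max]
  rw [hN, PySem.List.pyRange_one, List.flatMap_map]
  have h : (fun k : Nat =>
      (if (0 : Int) + ↑k < PySem.List.len tk then [PySem.List.pyGetD tk ((0 : Int) + ↑k) ' '] else [])
        ++ (if (0 : Int) + ↑k < PySem.List.len lf then [PySem.List.pyGetD lf ((0 : Int) + ↑k) ' '] else []))
      = fun k => pvG tk k ++ pvG lf k := by
    funext k
    simp only [zero_add, PySem.List.len_eq, PySem.List.pyGetD_natCast, pvG, Nat.cast_lt]
  simp only [List.nil_append, Int.sub_zero, Int.toNat_natCast, h]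
  exact pvFlat_il tk lf

lemma pvFuse_eq (tk lf : List Char) (r : Nat) :
    keygen2Fuse tk lf r = ((pvIl tk lf).take r).map keygen2Norm := by
  fun_induction keygen2Fuse tk lf r with
  | case1 => simp
  | case2 c tk d lf => simp [pvIl]
  | case3 c tk d lf r ih => simp [pvIl, ih]
  | case4 c tk r ih =>
    rw [ih]
    cases tk <;> simp [pvIl]
  | case5 d lf r ih => simp [pvIl, ih]
  | case6 => simp [pvIl]

lemma pvFinal (tk lf : List Char) (L : Int) (hL : 0 ≤ L) :
    String.ofList ((PySem.List.slice (keygen2Interleave tk lf) none (some L)).map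
      (fun c => Char.ofNat (c.toNat % 95 + 32)))
      = String.ofList (keygen2Fuse tk lf L.toNat) := by
  rw [PySem.List.slice_to _ hL, pvInterleave_eq, pvFuse_eq]
  rfl

-- ===== VERDICT (by name: the statement is the Claim_ definition above) =====
theorem keygen2_spec : Claim_equal_keygen2 := by
  intro m c _ _
  unfold Spec_keygen2 keygen2 keygen2_alt
  apply pvFinal
  have h33 := PySem.Int.mod_nonneg
    (a := PySem.Int.mod |((m.toList ++ c.toList).foldl
      (fun h ch => (ch.toNat : Int) + h * 31 + (h <<< 7) - h) 0)| 0x7FFFFFFFFFFFFFFF)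
    (b := (33 : Int)) (by norm_num)
  omega
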